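-- pv_equiv track=rewrite | github.com/vborra09/CV | part2/omr.py | treble_bass_grp
-- ===== SOURCE A (Python) =====
-- def treble_bass_grp(lines, big_jump=50):
--
--     sorted_rows = sorted(lines)
--     treble, bass = [], []
--     if not sorted_rows:
--         return treble, bass
--
--     use_treble = True
--     treble.append(sorted_rows[0])
--
--     for i in range(1, len(sorted_rows)):
--         if (sorted_rows[i] - sorted_rows[i-1]) > big_jump:
--
--             use_treble = not use_treble
--         if use_treble:
--             treble.append(sorted_rows[i])
--         else:
--             bass.append(sorted_rows[i])
--     return treble, bass
-- ===== SOURCE B (Python) =====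
-- def treble_bass_grp(lines, big_jump=50):
--     # Phase 1: split the sorted list into contiguous segments at big jumps.
--     srt = sorted(lines)
--     segments = []
--     cur = []
--     for v in srt:
--         if cur and v - cur[-1] > big_jump:
--             segments.append(cur)
--             cur = [v]
--         else:
--             cur.append(v)
--     if cur:
--         segments.append(cur)
--     # Phase 2: distribute segments by parity: even-index -> treble, odd -> bass.
--     treble, bass = [], []
--     for i, seg in enumerate(segments):
--         if i % 2 == 0:
--             treble.extend(seg)
--         else:
--             bass.extend(seg)
--     return treble, bass
-- ===== Notes on version B (the rewrite author's own statement) =====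
-- stated objective: alternative
-- what changed: B replaces A's single pass with a toggling use_treble flag by two distinct phases: first it groups the sorted list into contiguous segments at gaps exceeding big_jump, then it distributes whole segments to treble/bass by segment-index parity.
import Mathlib
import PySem

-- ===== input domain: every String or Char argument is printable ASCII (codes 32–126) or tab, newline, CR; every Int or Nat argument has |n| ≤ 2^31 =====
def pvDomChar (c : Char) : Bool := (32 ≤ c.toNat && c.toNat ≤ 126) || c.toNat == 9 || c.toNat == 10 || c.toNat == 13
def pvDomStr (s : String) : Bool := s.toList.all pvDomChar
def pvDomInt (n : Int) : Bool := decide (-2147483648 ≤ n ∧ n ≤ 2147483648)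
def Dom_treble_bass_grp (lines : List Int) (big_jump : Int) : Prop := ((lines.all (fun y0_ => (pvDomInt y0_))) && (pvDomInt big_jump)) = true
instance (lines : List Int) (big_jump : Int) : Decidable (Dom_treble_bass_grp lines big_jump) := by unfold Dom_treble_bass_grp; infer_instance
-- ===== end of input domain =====

-- B splits the sorted list into gap-delimited segments and then distributes segments
-- by index parity, instead of A's single pass with a toggling flag (objective: alternative).


-- ===== PORT A =====
-- A's loop 'for i in range(1, len(sorted_rows))' reads only sorted_rows[i] and
-- sorted_rows[i-1] (both always in range); ported as a structural recursion over the
-- tail carrying prev = sorted_rows[i-1] and the state (use_treble, treble, bass).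
def trebleBassLoopA (bj : Int) (prev : Int) (rest : List Int) (ut : Bool)
    (treble bass : List Int) : List Int × List Int :=
  match rest with
  | [] => (treble, bass)
  | x :: t =>
    let ut' := if x - prev > bj then !ut else ut
    if ut' then trebleBassLoopA bj x t ut' (treble ++ [x]) bass
    else trebleBassLoopA bj x t ut' treble (bass ++ [x])

def treble_bass_grp (lines : List Int) (big_jump : Int) : List Int × List Int :=
  let sorted_rows := PySem.List.sorted lines (fun x => x) false
  match sorted_rows with
  | [] => ([], [])
  | h :: t => trebleBassLoopA big_jump h t true [h] []

-- ===== PORT B =====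
-- Phase-1 step: 'if cur and v - cur[-1] > big_jump: segments.append(cur); cur = [v] else: cur.append(v)'
def segStep (bj : Int) (p : List (List Int) × List Int) (v : Int) : List (List Int) × List Int :=
  match p.2.getLast? with
  | some last => if v - last > bj then (p.1 ++ [p.2], [v]) else (p.1, p.2 ++ [v])
  | none => (p.1, p.2 ++ [v])

-- Phase-2 step: even segment index -> treble, odd -> bass
def distStep (p : List Int × List Int) (e : Int × List Int) : List Int × List Int :=
  if e.1 % 2 == 0 then (p.1 ++ e.2, p.2) else (p.1, p.2 ++ e.2)

def treble_bass_grp_alt (lines : List Int) (big_jump : Int) : List Int × List Int :=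
  let srt := PySem.List.sorted lines (fun x => x) false
  let sc := srt.foldl (segStep big_jump) ([], [])
  let segments := if sc.2 ≠ [] then sc.1 ++ [sc.2] else sc.1
  (PySem.List.enumerate segments 0).foldl distStep ([], [])

-- ===== PRECONDITION & SPEC =====
def Spec_treble_bass_grp (lines : List Int) (big_jump : Int) (out : List Int × List Int) : Prop := out = treble_bass_grp_alt lines big_jump
instance (lines : List Int) (big_jump : Int) (out : List Int × List Int) : Decidable (Spec_treble_bass_grp lines big_jump out) := by unfold Spec_treble_bass_grp; infer_instance

-- ===== CLAIM (what is proved, stated in full; the proofs are below) =====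
def Claim_equal_treble_bass_grp : Prop := ∀ (lines : List Int) (big_jump : Int), Dom_treble_bass_grp lines big_jump → Spec_treble_bass_grp lines big_jump (treble_bass_grp lines big_jump)

-- ===== LEMMAS AND PROOFS =====

-- recursive characterisation of B's phase-1 segmentation (cur nonempty throughout)
def segsOf (bj : Int) (cur : List Int) : List Int → List (List Int)
  | [] => [cur]
  | v :: t => if v - (cur.getLast?.getD 0) > bj then cur :: segsOf bj [v] t
              else segsOf bj (cur ++ [v]) t

-- alternate distribution of segments; the flag means "next segment goes to treble"
def distAux (tb : List Int × List Int) (even : Bool) : List (List Int) → List Int × List Int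
  | [] => tb
  | s :: r => if even then distAux (tb.1 ++ s, tb.2) false r else distAux (tb.1, tb.2 ++ s) true r

theorem segsOf_ne_nil (bj : Int) (cur : List Int) (t : List Int) : segsOf bj cur t ≠ [] := by
  induction t generalizing cur with
  | nil => simp [segsOf]
  | cons v t ih => simp only [segsOf]; split <;> simp [ih]

-- the head segment of the segmentation extends the current run
theorem segsOf_extend (bj : Int) (t : List Int) : ∀ (c d : List Int), d ≠ [] →
    segsOf bj (c ++ d) t = (c ++ (segsOf bj d t).headI) :: (segsOf bj d t).tail := by
  induction t with
  | nil => intro c d _; simp [segsOf]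
  | cons v t ih =>
    intro c d hd
    simp only [segsOf, List.getLast?_append_of_ne_nil _ hd]
    split
    · simp [List.headI, List.tail]
    · have := ih c (d ++ [v]) (by simp)
      rw [← List.append_assoc] at this
      rw [this]

theorem segsOf_headI_v (bj v : Int) (t : List Int) :
    (segsOf bj [v] t).headI = v :: (segsOf bj [v] t).headI.tail := by
  cases t with
  | nil => simp [segsOf, List.headI]
  | cons w tw =>
    simp only [segsOf]
    split
    · simp [List.headI]
    · rw [segsOf_extend bj tw [v] [w] (by simp)]
      simp [List.headI]

theorem loopA_eq_dist (bj : Int) (t : List Int) : ∀ (c : List Int) (hc : c ≠ []) (ut : Bool)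
    (treble bass : List Int),
    trebleBassLoopA bj (c.getLast hc) t ut treble bass =
      distAux (if ut then (treble ++ (segsOf bj c t).headI.drop c.length, bass)
               else (treble, bass ++ (segsOf bj c t).headI.drop c.length))
        (!ut) ((segsOf bj c t).tail) := by
  induction t with
  | nil =>
    intro c hc ut treble bass
    simp only [trebleBassLoopA, segsOf, List.headI, List.tail, List.drop_length, distAux]
    cases ut <;> simp
  | cons v t ih =>
    intro c hc ut treble bass
    have hlast : c.getLast?.getD 0 = c.getLast hc := by
      rw [List.getLast?_eq_some_getLast hc]; rfl
    simp only [trebleBassLoopA, segsOf, hlast]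
    have hne := segsOf_ne_nil bj [v] t
    have hhv := segsOf_headI_v bj v t
    rcases hseq0 : segsOf bj [v] t with _ | ⟨s0, r⟩
    · exact absurd hseq0 hne
    · rw [hseq0] at hhv
      rcases s0 with _ | ⟨a, tl⟩
      · simp [List.headI] at hhv
      · have hav : a = v := by
          simp only [List.headI, List.tail] at hhv
          exact (List.cons.injEq _ _ _ _ ▸ hhv).1
        rw [hav] at hseq0 ⊢
        clear hhv hav
        by_cases hj : v - c.getLast hc > bj
        · simp only [if_pos hj]
          cases ut with
          | true =>
            have hIH := ih [v] (by simp) false treble (bass ++ [v])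
            simp only [List.getLast_singleton, hseq0, Bool.false_eq_true, if_false,
              Bool.not_false, List.headI, List.tail, List.length_singleton] at hIH
            simp only [Bool.not_true, Bool.false_eq_true, if_false]
            rw [hIH]
            simp [distAux, List.headI]
          | false =>
            have hIH := ih [v] (by simp) true (treble ++ [v]) bass
            simp only [List.getLast_singleton, hseq0, if_true, Bool.not_true,
              List.headI, List.tail, List.length_singleton] at hIH
            simp only [Bool.not_false, if_true]
            rw [hIH]
            simp [distAux, List.headI]
        · simp only [if_neg hj]
          have hcv : (c ++ [v] : List Int) ≠ [] := by simp
          have hl : (c ++ [v]).getLast hcv = v := by simp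
          have hext := segsOf_extend bj t c [v] (by simp)
          have hext' : segsOf bj (c ++ [v]) t = (c ++ v :: tl) :: r := by
            rw [hext, hseq0]; simp [List.headI, List.tail]
          have hd1 : (c ++ v :: tl).drop (c ++ [v]).length = tl := by
            rw [show c ++ v :: tl = (c ++ [v]) ++ tl by simp]
            exact List.drop_left
          have hd0 : (c ++ v :: tl).drop c.length = v :: tl := List.drop_left
          cases ut with
          | true =>
            have hIH := ih (c ++ [v]) hcv true (treble ++ [v]) bass
            rw [hl] at hIH
            simp only [hext', List.headI, List.tail, hd1, if_true] at hIH
            simp only [if_true]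
            rw [hIH]
            simp [hext', List.headI, List.tail, hd0]
          | false =>
            have hIH := ih (c ++ [v]) hcv false treble (bass ++ [v])
            rw [hl] at hIH
            simp only [hext', List.headI, List.tail, hd1, Bool.false_eq_true, if_false] at hIH
            simp only [Bool.false_eq_true, if_false]
            rw [hIH]
            simp [hext', List.headI, List.tail, hd0]

-- B's phase-1 fold computes segsOf
theorem foldl_segStep (bj : Int) (rest : List Int) : ∀ (segs : List (List Int)) (cur : List Int),
    cur ≠ [] →
    (rest.foldl (segStep bj) (segs, cur)).2 ≠ [] ∧
      (rest.foldl (segStep bj) (segs, cur)).1 ++ [(rest.foldl (segStep bj) (segs, cur)).2]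
        = segs ++ segsOf bj cur rest := by
  induction rest with
  | nil => intro segs cur hc; exact ⟨hc, by simp [segsOf]⟩
  | cons v t ih =>
    intro segs cur hc
    have hlast : cur.getLast? = some (cur.getLast hc) := List.getLast?_eq_some_getLast hc
    have hlast' : cur.getLast?.getD 0 = cur.getLast hc := by rw [hlast]; rfl
    simp only [List.foldl_cons, segStep, hlast]
    by_cases hj : v - cur.getLast hc > bj
    · simp only [if_pos hj]
      have h := ih (segs ++ [cur]) [v] (by simp)
      refine ⟨h.1, ?_⟩
      rw [h.2]
      simp [segsOf, hlast', if_pos hj]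
    · simp only [if_neg hj]
      have h := ih segs (cur ++ [v]) (by simp)
      refine ⟨h.1, ?_⟩
      rw [h.2]
      simp [segsOf, hlast', if_neg hj]

-- B's phase-2 fold equals distAux (segment-index parity = the flag)
theorem foldl_distStep (segs : List (List Int)) : ∀ (n : Int) (tb : List Int × List Int),
    (PySem.List.enumerate segs n).foldl distStep tb = distAux tb (n % 2 == 0) segs := by
  induction segs with
  | nil => intro n tb; simp [PySem.List.enumerate_nil, distAux]
  | cons s r ih =>
    intro n tb
    rw [PySem.List.enumerate_cons, List.foldl_cons, ih]
    simp only [distStep, distAux]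
    by_cases h : n % 2 = 0
    · have h1 : (n + 1) % 2 = 1 := by omega
      simp [h, h1]
    · have h1 : (n + 1) % 2 ≠ 1 ∨ True := Or.inr trivial
      have h0 : ¬ (n % 2 == 0) = true := by simpa using h
      have h2 : (n + 1) % 2 = 0 := by omega
      simp [h0, h2]

-- ===== VERDICT (by name: the statement is the Claim_ definition above) =====
theorem treble_bass_grp_spec : Claim_equal_treble_bass_grp := by
  intro lines big_jump _
  unfold Spec_treble_bass_grp treble_bass_grp treble_bass_grp_alt
  cases hs : PySem.List.sorted lines (fun x => x) false with
  | nil => simp [PySem.List.enumerate_nil]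
  | cons h t =>
    simp only []
    have hstep1 : segStep big_jump ([], []) h = ([], [h]) := by simp [segStep]
    have hfold : (h :: t).foldl (segStep big_jump) ([], []) = t.foldl (segStep big_jump) ([], [h]) := by
      rw [List.foldl_cons, hstep1]
    have hseg := foldl_segStep big_jump t [] [h] (by simp)
    rw [hfold, if_pos hseg.1, foldl_distStep _ 0 ([], []), hseg.2]
    have hA := loopA_eq_dist big_jump t [h] (by simp) true [h] []
    simp only [List.getLast_singleton, if_true, Bool.not_true, List.length_singleton] at hA
    rw [hA]
    have hhv := segsOf_headI_v big_jump h t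
    have hne := segsOf_ne_nil big_jump [h] t
    rcases hseq : segsOf big_jump [h] t with _ | ⟨s0, r⟩
    · exact absurd hseq hne
    · rw [hseq] at hhv
      rcases s0 with _ | ⟨a, tl⟩
      · simp [List.headI] at hhv
      · have hav : a = h := by
          simp only [List.headI, List.tail] at hhv
          exact (List.cons.injEq _ _ _ _ ▸ hhv).1
        subst hav
        simp [distAux, List.headI, List.tail]
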